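-- pv_equiv track=rewrite | github.com/Rosaleenvdwel/CryptoHack | Mathematics/modularmath/qs.py | find_quadratic_residues
-- ===== SOURCE A (Python) =====
-- def find_quadratic_residues(p, integers):
--     residues = {}
--
--     for x in integers:
--         for a in range(p):
--             if (a * a) % p == x:
--                 residues[x] = a  #first found root
--                 break
--
--     return residues
-- ===== SOURCE B (Python) =====
-- def find_quadratic_residues(p, integers):
--     # One shared incremental scan of range(p), memoized: residue -> smallest root
--     # found so far; each integer is answered from the cache or by extending the scan.
--     table = {}
--     pos = 0
--     residues = {}
--     for x in integers:
--         if x in residues: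
--             continue
--         if x in table:
--             residues[x] = table[x]
--             continue
--         while pos < p:
--             a = pos
--             pos = pos + 1
--             r = (a * a) % p
--             if r not in table:
--                 table[r] = a
--             if r == x:
--                 residues[x] = a
--                 break
--     return residues
-- ===== Notes on version B (the rewrite author's own statement) =====
-- stated objective: faster
-- what changed: Instead of rescanning range(p) from 0 for every integer, B runs one shared memoized scan: it caches residue->smallest-root as it advances and answers each integer from the cache or by extending the scan, so range(p) is traversed at most once in total.
import Mathlib
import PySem

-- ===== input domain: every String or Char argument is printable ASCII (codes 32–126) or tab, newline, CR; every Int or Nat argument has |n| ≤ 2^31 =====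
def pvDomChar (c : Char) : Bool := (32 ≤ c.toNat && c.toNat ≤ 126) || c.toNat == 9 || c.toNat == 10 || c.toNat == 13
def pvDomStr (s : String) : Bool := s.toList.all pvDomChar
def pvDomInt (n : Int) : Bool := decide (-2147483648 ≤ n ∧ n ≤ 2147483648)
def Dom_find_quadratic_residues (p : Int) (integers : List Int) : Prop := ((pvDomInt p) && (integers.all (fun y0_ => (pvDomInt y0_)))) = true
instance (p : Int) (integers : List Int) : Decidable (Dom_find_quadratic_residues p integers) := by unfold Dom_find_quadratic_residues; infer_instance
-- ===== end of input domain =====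

-- B replaces A's per-integer rescan of range(p) by one shared memoized scan (residue ->
-- smallest root cached as the scan advances); objective: faster.

-- ===== PORT A =====
-- inner 'for a in range(p): if (a*a) % p == x: …; break' — a counter recursion, lazy like
-- Python's range with break: returns the first root found
def pvFindA (p x a : Int) : Option Int :=
  if a < p then
    if PySem.Int.mod (a * a) p = x then some a else pvFindA p x (a + 1)
  else none
termination_by (p - a).toNat
decreasing_by omega

def pvStepA (p : Int) (d : PySem.Dict Int Int) (x : Int) : PySem.Dict Int Int :=
  match pvFindA p x 0 with
  | some a => d.insert x a   -- residues[x] = a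
  | none => d

def find_quadratic_residues (p : Int) (integers : List Int) : List (Int × Int) :=
  (integers.foldl (pvStepA p) PySem.Dict.empty).items

-- ===== PORT B =====
-- the 'while pos < p: …' loop of B: advance the shared scan, caching residue -> smallest
-- root in `table`, until the residue x is hit (break) or the scan is exhausted
def pvScan (p x : Int) (t : PySem.Dict Int Int) (pos : Int) :
    PySem.Dict Int Int × Int × Option Int :=
  if pos < p then
    let r := PySem.Int.mod (pos * pos) p
    let t' := if t.contains r then t else t.insert r pos   -- if r not in table: table[r] = a
    if r = x then (t', pos + 1, some pos)                  -- residues[x] = a; break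
    else pvScan p x t' (pos + 1)
  else (t, pos, none)
termination_by (p - pos).toNat
decreasing_by omega

-- one iteration of B's 'for x in integers' loop over the state (table, pos, residues)
def pvStepB (p : Int) (s : PySem.Dict Int Int × Int × PySem.Dict Int Int) (x : Int) :
    PySem.Dict Int Int × Int × PySem.Dict Int Int :=
  let (t, pos, d) := s
  if d.contains x then s                                   -- if x in residues: continue
  else
    match t.get? x with
    | some a => (t, pos, d.insert x a)                     -- if x in table: residues[x] = table[x]
    | none =>
      match pvScan p x t pos with
      | (t', pos', some a) => (t', pos', d.insert x a)
      | (t', pos', none) => (t', pos', d)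

def find_quadratic_residues_alt (p : Int) (integers : List Int) : List (Int × Int) :=
  (integers.foldl (pvStepB p) (PySem.Dict.empty, 0, PySem.Dict.empty)).2.2.items

-- ===== PRECONDITION & SPEC =====
def Spec_find_quadratic_residues (p : Int) (integers : List Int) (out : List (Int × Int)) : Prop := out = find_quadratic_residues_alt p integers
instance (p : Int) (integers : List Int) (out : List (Int × Int)) : Decidable (Spec_find_quadratic_residues p integers out) := by unfold Spec_find_quadratic_residues; infer_instance

-- ===== CLAIM (what is proved, stated in full; the proofs are below) =====
def Claim_equal_find_quadratic_residues : Prop := ∀ (p : Int) (integers : List Int), Dom_find_quadratic_residues p integers → Spec_find_quadratic_residues p integers (find_quadratic_residues p integers)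

-- ===== LEMMAS AND PROOFS =====

-- proof-side list view of A's inner scan, and the bridge to the counter recursion
def pvFindL (p x : Int) : List Int → Option Int
  | [] => none
  | a :: rest => if PySem.Int.mod (a * a) p = x then some a else pvFindL p x rest

theorem pvFindA_eq_list (p x : Int) : ∀ (n : Nat) (a : Int), (p - a).toNat ≤ n →
    pvFindA p x a = pvFindL p x (PySem.List.pyRange a p 1) := by
  intro n
  induction n with
  | zero =>
    intro a h
    have hap : ¬ a < p := by omega
    rw [pvFindA]
    have : PySem.List.pyRange a p 1 = [] := by
      rw [PySem.List.pyRange_one]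
      have : (p - a).toNat = 0 := by omega
      simp [this]
    simp [hap, this, pvFindL]
  | succ n ih =>
    intro a h
    by_cases hap : a < p
    · rw [pvFindA, PySem.List.pyRange_one_cons hap]
      simp only [hap, if_true, pvFindL]
      by_cases hr : PySem.Int.mod (a * a) p = x
      · simp [hr]
      · simp only [hr, if_false]
        exact ih (a + 1) (by omega)
    · rw [pvFindA]
      have : PySem.List.pyRange a p 1 = [] := by
        rw [PySem.List.pyRange_one]
        have : (p - a).toNat = 0 := by omega
        simp [this]
      simp [hap, this, pvFindL]

theorem pvFindL_append (p x : Int) (l1 l2 : List Int) :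
    pvFindL p x (l1 ++ l2) = (pvFindL p x l1).or (pvFindL p x l2) := by
  induction l1 with
  | nil => simp [pvFindL]
  | cons a l1 ih =>
    simp only [List.cons_append, pvFindL]
    by_cases hr : PySem.Int.mod (a * a) p = x <;> simp [hr, ih]

-- the table state of B's scan: the pvStepT fold over the already-scanned prefix
def pvStepT (p : Int) (t : PySem.Dict Int Int) (a : Int) : PySem.Dict Int Int :=
  if t.contains (PySem.Int.mod (a * a) p) then t else t.insert (PySem.Int.mod (a * a) p) a

def pvT (p q : Int) : PySem.Dict Int Int :=
  (PySem.List.pyRange 0 q 1).foldl (pvStepT p) PySem.Dict.empty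

-- that table answers exactly what A's inner scan finds on the scanned prefix
theorem pvTable_get (p x : Int) : ∀ (L : List Int) (t : PySem.Dict Int Int),
    (L.foldl (pvStepT p) t).get? x = (t.get? x).or (pvFindL p x L) := by
  intro L
  induction L with
  | nil => intro t; simp [pvFindL]
  | cons a L ih =>
    intro t
    simp only [List.foldl_cons, ih, pvStepT, pvFindL]
    by_cases hc : t.contains (PySem.Int.mod (a * a) p) = true
    · have hs : (t.get? (PySem.Int.mod (a * a) p)).isSome = true := by
        rw [← PySem.Dict.contains_eq_isSome_get?]; exact hc
      rcases Option.isSome_iff_exists.mp hs with ⟨v, hv⟩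
      by_cases hr : PySem.Int.mod (a * a) p = x
      · subst hr; simp [hc, hv]
      · simp [hc, hr]
    · have hnone : t.get? (PySem.Int.mod (a * a) p) = none := by
        rw [PySem.Dict.contains_eq_isSome_get?] at hc
        cases h : t.get? (PySem.Int.mod (a * a) p) <;> simp [h] at hc ⊢
      by_cases hr : PySem.Int.mod (a * a) p = x
      · subst hr
        simp [hc, PySem.Dict.get?_insert_self, hnone]
      · have hxa : x ≠ PySem.Int.mod (a * a) p := fun h => hr h.symm
        simp [hc, hr, PySem.Dict.get?_insert_of_ne _ _ hxa]

theorem pvT_succ (p q : Int) (h0 : 0 ≤ q) (_hq : q < p) :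
    pvT p (q + 1) = pvStepT p (pvT p q) q := by
  unfold pvT
  rw [PySem.List.pyRange_one_succ_right (by omega), List.foldl_append]
  rfl

theorem pvT_split (p q : Int) (h0 : 0 ≤ q) (hq2 : q ≤ p ∨ (p ≤ 0 ∧ q = 0)) (x : Int) :
    pvFindA p x 0 = ((pvT p q).get? x).or (pvFindL p x (PySem.List.pyRange q p 1)) := by
  have hsplit : PySem.List.pyRange 0 p 1 =
      PySem.List.pyRange 0 q 1 ++ PySem.List.pyRange q p 1 := by
    rcases hq2 with hq | ⟨hp, hq⟩
    · exact PySem.List.pyRange_one_append 0 q p h0 hq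
    · subst hq
      have h1 : PySem.List.pyRange 0 0 (1:Int) = [] := by
        rw [PySem.List.pyRange_one]; simp
      simp [h1]
  rw [pvFindA_eq_list p x (p - 0).toNat 0 (le_refl _), hsplit, pvFindL_append,
    pvT, pvTable_get]
  simp

-- B's scan returns the first root at index ≥ pos and advances the table fold with it
theorem pvScan_spec (p x : Int) : ∀ (n : Nat) (pos : Int), (p - pos).toNat ≤ n → 0 ≤ pos →
    ∃ pos', pvScan p x (pvT p pos) pos
        = (pvT p pos', pos', pvFindL p x (PySem.List.pyRange pos p 1))
      ∧ pos ≤ pos' ∧ (pos' ≤ p ∨ pos' = pos) := by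
  intro n
  induction n with
  | zero =>
    intro pos h h0
    have hap : ¬ pos < p := by omega
    refine ⟨pos, ?_, le_refl _, Or.inr rfl⟩
    rw [pvScan]
    have : PySem.List.pyRange pos p 1 = [] := by
      rw [PySem.List.pyRange_one]
      have : (p - pos).toNat = 0 := by omega
      simp [this]
    simp [hap, this, pvFindL]
  | succ n ih =>
    intro pos h h0
    by_cases hap : pos < p
    · rw [pvScan]
      simp only [hap, if_true]
      rw [PySem.List.pyRange_one_cons hap]
      have hstep : (if (pvT p pos).contains (PySem.Int.mod (pos * pos) p) then pvT p pos
          else (pvT p pos).insert (PySem.Int.mod (pos * pos) p) pos) = pvT p (pos + 1) := by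
        rw [pvT_succ p pos h0 hap]; rfl
      by_cases hr : PySem.Int.mod (pos * pos) p = x
      · refine ⟨pos + 1, ?_, by omega, Or.inl (by omega)⟩
        rw [if_pos hr, hstep]
        simp [pvFindL, hr]
      · rcases ih (pos + 1) (by omega) (by omega) with ⟨pos', hsc, hle, hub⟩
        refine ⟨pos', ?_, by omega, Or.inl (by rcases hub with h | h <;> omega)⟩
        rw [if_neg hr, hstep, hsc]
        simp [pvFindL, hr]
    · refine ⟨pos, ?_, le_refl _, Or.inr rfl⟩
      rw [pvScan]
      have : PySem.List.pyRange pos p 1 = [] := by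
        rw [PySem.List.pyRange_one]
        have : (p - pos).toNat = 0 := by omega
        simp [this]
      simp [hap, this, pvFindL]

-- overwriting a key with the value it already holds leaves the dict unchanged
theorem pvInsert_same (d : PySem.Dict Int Int) (x a : Int)
    (hnd : d.keys.Nodup) (h : d.get? x = some a) : d.insert x a = d := by
  apply PySem.Dict.ext
  have hc : d.contains x = true := by
    rw [PySem.Dict.contains_eq_isSome_get?, h]; rfl
  rw [PySem.Dict.items_insert_of_contains d a hc]
  have : ∀ q ∈ d.items, (if q.1 == x then (x, a) else q) = q := by
    intro q hq
    by_cases hqx : q.1 = x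
    · have hg : d.get? q.1 = some q.2 := PySem.Dict.get?_of_mem_items d hq hnd
      rw [hqx, h] at hg
      have h2 : q.2 = a := (Option.some.inj hg).symm
      simp [hqx]
      exact Prod.ext hqx.symm h2.symm
    · simp [hqx]
  rw [List.map_congr_left this]; exact List.map_id _

-- both loops produce the same residues dict, given the running state is consistent
theorem pvMain (p : Int) : ∀ (L : List Int) (pos : Int) (d : PySem.Dict Int Int),
    0 ≤ pos → (pos ≤ p ∨ (p ≤ 0 ∧ pos = 0)) →
    d.keys.Nodup →
    (∀ k v, d.get? k = some v → pvFindA p k 0 = some v) →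
    L.foldl (pvStepA p) d = (L.foldl (pvStepB p) (pvT p pos, pos, d)).2.2 := by
  intro L
  induction L with
  | nil => intro pos d _ _ _ _; rfl
  | cons x L ih =>
    intro pos d h0 hub hnd hinv
    simp only [List.foldl_cons]
    have htfull := pvT_split p pos h0 hub x
    by_cases hd : d.contains x = true
    · -- x already recorded: A re-inserts the same first root, B skips
      have hs : (d.get? x).isSome = true := by
        rw [← PySem.Dict.contains_eq_isSome_get?]; exact hd
      rcases Option.isSome_iff_exists.mp hs with ⟨v, hv⟩
      have hf : pvFindA p x 0 = some v := hinv x v hv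
      have hA : pvStepA p d x = d := by
        rw [pvStepA, hf]
        exact pvInsert_same d x v hnd hv
      have hB : pvStepB p (pvT p pos, pos, d) x = (pvT p pos, pos, d) := by
        simp [pvStepB, hd]
      rw [hA, hB]; exact ih pos d h0 hub hnd hinv
    · have hd' : d.contains x = false := by
        cases h : d.contains x
        · rfl
        · exact absurd h hd
      cases hget : (pvT p pos).get? x with
      | some a =>
        -- cached root: same first root as A's scan from 0
        have hf : pvFindA p x 0 = some a := by rw [htfull, hget]; rfl
        have hA : pvStepA p d x = d.insert x a := by rw [pvStepA, hf]
        have hB : pvStepB p (pvT p pos, pos, d) x = (pvT p pos, pos, d.insert x a) := by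
          simp [pvStepB, hd', hget]
        rw [hA, hB]
        refine ih pos (d.insert x a) h0 hub (PySem.Dict.nodup_keys_insert _ _ _ hnd) ?_
        intro k v hkv
        rw [PySem.Dict.get?_insert] at hkv
        by_cases hkx : k = x
        · rw [if_pos hkx] at hkv
          rw [hkx, hf, ← Option.some.inj hkv]
        · rw [if_neg hkx] at hkv
          exact hinv k v hkv
      | none =>
        rcases pvScan_spec p x (p - pos).toNat pos (le_refl _) h0 with ⟨pos', hsc, hle, hub'⟩
        have hub'' : pos' ≤ p ∨ (p ≤ 0 ∧ pos' = 0) := by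
          rcases hub' with h | h
          · exact Or.inl h
          · rcases hub with h2 | ⟨h2, h3⟩
            · exact Or.inl (h ▸ h2)
            · exact Or.inr ⟨h2, h ▸ h3⟩
        have hf : pvFindA p x 0 = pvFindL p x (PySem.List.pyRange pos p 1) := by
          rw [htfull, hget]; rfl
        cases hres : pvFindL p x (PySem.List.pyRange pos p 1) with
        | some a =>
          have hA : pvStepA p d x = d.insert x a := by rw [pvStepA, hf, hres]
          have hB : pvStepB p (pvT p pos, pos, d) x = (pvT p pos', pos', d.insert x a) := by
            simp only [pvStepB, hd', Bool.false_eq_true, if_false, hget]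
            rw [hsc, hres]
          rw [hA, hB]
          refine ih pos' (d.insert x a) (by omega) hub''
            (PySem.Dict.nodup_keys_insert _ _ _ hnd) ?_
          intro k v hkv
          rw [PySem.Dict.get?_insert] at hkv
          by_cases hkx : k = x
          · rw [if_pos hkx] at hkv
            rw [hkx, hf, hres, ← Option.some.inj hkv]
          · rw [if_neg hkx] at hkv
            exact hinv k v hkv
        | none =>
          have hA : pvStepA p d x = d := by rw [pvStepA, hf, hres]
          have hB : pvStepB p (pvT p pos, pos, d) x = (pvT p pos', pos', d) := by
            simp only [pvStepB, hd', Bool.false_eq_true, if_false, hget]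
            rw [hsc, hres]
          rw [hA, hB]
          exact ih pos' d (by omega) hub'' hnd hinv

-- ===== VERDICT (by name: the statement is the Claim_ definition above) =====
theorem find_quadratic_residues_spec : Claim_equal_find_quadratic_residues := by
  intro p integers _
  show find_quadratic_residues p integers = find_quadratic_residues_alt p integers
  unfold find_quadratic_residues find_quadratic_residues_alt
  have hT0 : pvT p 0 = PySem.Dict.empty := by
    unfold pvT
    rw [PySem.List.pyRange_one]; simp
  rw [pvMain p integers 0 PySem.Dict.empty (le_refl _)
      (by by_cases h : 0 ≤ p
          · exact Or.inl (by omega)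
          · exact Or.inr (by omega))
      PySem.Dict.nodup_keys_empty
      (by intro k v h; simp [PySem.Dict.get?_empty] at h),
    hT0]
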